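-- pv_equiv track=rewrite | github.com/malcolmzawacki/physicsWebApp | utils/generators/torque_generator.py | _rank_slot_labels
-- ===== SOURCE A (Python) =====
-- def _rank_slot_labels(count: int) -> list[str]:
--     if count <= 1:
--         return ["Only Option"]
--     if count == 2:
--         return ["Least", "Most"]
--     if count == 3:
--         return ["Least", "Middle", "Most"]
--
--     labels = []
--     for idx in range(count):
--         if idx == 0:
--             labels.append("Least")
--         elif idx == count - 1:
--             labels.append("Most")
--         elif idx == 1:
--             labels.append("Second Least")
--         elif idx == count - 2:
--             labels.append("Second Most")
--         elif count % 2 == 1 and idx == count // 2: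
--             labels.append("Middle")
--         else:
--             labels.append(f"Position {idx + 1}")
--     return labels
-- ===== SOURCE B (Python) =====
-- def _rank_slot_labels(count: int) -> list[str]:
--     if count <= 1:
--         return ["Only Option"]
--     if count == 2:
--         return ["Least", "Most"]
--     if count == 3:
--         return ["Least", "Middle", "Most"]
--
--     def positions(lo, hi):
--         return [f"Position {i + 1}" for i in range(lo, hi)]
--
--     if count % 2 == 1:
--         mid = count // 2
--         core = positions(2, mid) + ["Middle"] + positions(mid + 1, count - 2)
--     else:
--         core = positions(2, count - 2)
--     return ["Least", "Second Least"] + core + ["Second Most", "Most"]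
-- ===== Notes on version B (the rewrite author's own statement) =====
-- stated objective: alternative
-- what changed: Replaces A's single per-index six-way branching loop over range(count) with a segment-concatenation construction: the result is assembled as ['Least','Second Least'] + plain Position runs (split around 'Middle' when count is odd) + ['Second Most','Most'], so no index is ever tested against the named slots.
import Mathlib
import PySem

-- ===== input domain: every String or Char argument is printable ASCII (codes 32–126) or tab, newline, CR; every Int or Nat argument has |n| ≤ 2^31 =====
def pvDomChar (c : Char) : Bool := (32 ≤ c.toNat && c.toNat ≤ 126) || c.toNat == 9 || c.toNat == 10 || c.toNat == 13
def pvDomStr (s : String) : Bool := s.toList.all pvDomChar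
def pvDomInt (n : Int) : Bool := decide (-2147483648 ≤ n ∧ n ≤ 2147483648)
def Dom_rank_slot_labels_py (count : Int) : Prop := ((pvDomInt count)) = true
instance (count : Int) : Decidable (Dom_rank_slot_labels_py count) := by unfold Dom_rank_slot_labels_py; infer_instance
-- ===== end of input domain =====

-- B assembles the list by concatenating segments (named ends + plain "Position" runs split
-- around "Middle") instead of A's per-index branching loop; alternative decomposition, same cost.

-- ===== PORT A =====
def rank_slot_labels_py (count : Int) : List String :=
  if count ≤ 1 then ["Only Option"]
  else if count = 2 then ["Least", "Most"]
  else if count = 3 then ["Least", "Middle", "Most"]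
  else
    (PySem.List.pyRange 0 count 1).foldl (fun labels idx =>
      if idx = 0 then labels ++ ["Least"]
      else if idx = count - 1 then labels ++ ["Most"]
      else if idx = 1 then labels ++ ["Second Least"]
      else if idx = count - 2 then labels ++ ["Second Most"]
      else if PySem.Int.mod count 2 = 1 ∧ idx = PySem.Int.floordiv count 2 then labels ++ ["Middle"]
      else labels ++ ["Position " ++ PySem.Int.toStr (idx + 1)]) []

-- ===== PORT B =====
-- positions(lo, hi) = [f"Position {i+1}" for i in range(lo, hi)]
def pvPositions (lo hi : Int) : List String :=
  (PySem.List.pyRange lo hi 1).map (fun i => "Position " ++ PySem.Int.toStr (i + 1))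

def rank_slot_labels_py_alt (count : Int) : List String :=
  if count ≤ 1 then ["Only Option"]
  else if count = 2 then ["Least", "Most"]
  else if count = 3 then ["Least", "Middle", "Most"]
  else
    let core :=
      if PySem.Int.mod count 2 = 1 then
        pvPositions 2 (PySem.Int.floordiv count 2) ++ ["Middle"] ++
          pvPositions (PySem.Int.floordiv count 2 + 1) (count - 2)
      else pvPositions 2 (count - 2)
    ["Least", "Second Least"] ++ core ++ ["Second Most", "Most"]

-- ===== PRECONDITION & SPEC =====
def Spec_rank_slot_labels_py (count : Int) (out : List String) : Prop := out = rank_slot_labels_py_alt count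
instance (count : Int) (out : List String) : Decidable (Spec_rank_slot_labels_py count out) := by unfold Spec_rank_slot_labels_py; infer_instance

-- ===== CLAIM (what is proved, stated in full; the proofs are below) =====
def Claim_equal_rank_slot_labels_py : Prop := ∀ (count : Int), Dom_rank_slot_labels_py count → Spec_rank_slot_labels_py count (rank_slot_labels_py count)

-- ===== LEMMAS AND PROOFS =====

-- the per-index label A's loop appends (proof-only helper)
def pvLabelA (count idx : Int) : String :=
  if idx = 0 then "Least"
  else if idx = count - 1 then "Most"
  else if idx = 1 then "Second Least"
  else if idx = count - 2 then "Second Most"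
  else if PySem.Int.mod count 2 = 1 ∧ idx = PySem.Int.floordiv count 2 then "Middle"
  else "Position " ++ PySem.Int.toStr (idx + 1)

theorem pvA_loop_eq_map (count : Int) (h : ¬ count ≤ 1) (h2 : ¬ count = 2) (h3 : ¬ count = 3) :
    rank_slot_labels_py count = (PySem.List.pyRange 0 count 1).map (pvLabelA count) := by
  unfold rank_slot_labels_py
  rw [if_neg h, if_neg h2, if_neg h3]
  have : (fun (labels : List String) idx =>
      if idx = 0 then labels ++ ["Least"]
      else if idx = count - 1 then labels ++ ["Most"]
      else if idx = 1 then labels ++ ["Second Least"]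
      else if idx = count - 2 then labels ++ ["Second Most"]
      else if PySem.Int.mod count 2 = 1 ∧ idx = PySem.Int.floordiv count 2 then labels ++ ["Middle"]
      else labels ++ ["Position " ++ PySem.Int.toStr (idx + 1)])
      = (fun (labels : List String) idx => labels ++ [pvLabelA count idx]) := by
    funext labels idx
    unfold pvLabelA
    split_ifs <;> rfl
  rw [this, PySem.List.foldl_append_singleton_eq_map]
  simp

theorem pvLabelA_pos (count i : Int) (h0 : i ≠ 0) (h1 : i ≠ 1) (hc1 : i ≠ count - 1)
    (hc2 : i ≠ count - 2) (hm : ¬ (PySem.Int.mod count 2 = 1 ∧ i = PySem.Int.floordiv count 2)) :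
    pvLabelA count i = "Position " ++ PySem.Int.toStr (i + 1) := by
  unfold pvLabelA
  rw [if_neg h0, if_neg hc1, if_neg h1, if_neg hc2, if_neg hm]

theorem pvSeg (count lo hi : Int)
    (h : ∀ i, lo ≤ i → i < hi → pvLabelA count i = "Position " ++ PySem.Int.toStr (i + 1)) :
    (PySem.List.pyRange lo hi 1).map (pvLabelA count) = pvPositions lo hi := by
  unfold pvPositions
  refine List.map_congr_left ?_
  intro i hi'
  rw [PySem.List.mem_pyRange_one] at hi'
  exact h i hi'.1 hi'.2

-- ===== VERDICT (by name: the statement is the Claim_ definition above) =====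
theorem rank_slot_labels_py_spec : Claim_equal_rank_slot_labels_py := by
  intro count _
  unfold Spec_rank_slot_labels_py
  by_cases h1 : count ≤ 1
  · simp [rank_slot_labels_py, rank_slot_labels_py_alt, h1]
  by_cases h2 : count = 2
  · simp [rank_slot_labels_py, rank_slot_labels_py_alt, h2]
  by_cases h3 : count = 3
  · simp [rank_slot_labels_py, rank_slot_labels_py_alt, h3]
  obtain ⟨n, rfl | rfl⟩ := count.eq_nat_or_neg
  swap
  · omega
  have hn : 4 ≤ n := by omega
  rw [pvA_loop_eq_map _ h1 h2 h3]
  unfold rank_slot_labels_py_alt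
  rw [if_neg h1, if_neg h2, if_neg h3]
  have hmod : PySem.Int.mod (n : Int) 2 = ((n % 2 : Nat) : Int) := by
    exact_mod_cast PySem.Int.mod_natCast n 2
  have hdiv : PySem.Int.floordiv (n : Int) 2 = ((n / 2 : Nat) : Int) := by
    exact_mod_cast PySem.Int.floordiv_natCast n 2
  -- split A's range into [0,1], the core range, and the last two indices
  rw [PySem.List.pyRange_one_append 0 2 (n : Int) (by omega) (by omega),
      PySem.List.pyRange_one_append 2 ((n : Int) - 2) (n : Int) (by omega) (by omega)]
  have hhead : PySem.List.pyRange 0 2 1 = [0, 1] := by decide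
  have htail : PySem.List.pyRange ((n : Int) - 2) (n : Int) 1 = [(n : Int) - 2, (n : Int) - 1] := by
    rw [PySem.List.pyRange_one_cons (by omega), PySem.List.pyRange_one_cons (by omega),
        PySem.List.pyRange_one_eq_nil (by omega)]
    norm_num
    omega
  rw [hhead, htail]
  simp only [List.map_append, List.map_cons, List.map_nil]
  have e0 : pvLabelA (n : Int) 0 = "Least" := by unfold pvLabelA; rw [if_pos rfl]
  have e1 : pvLabelA (n : Int) 1 = "Second Least" := by
    unfold pvLabelA
    rw [if_neg (by omega), if_neg (by omega), if_pos rfl]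
  have e2 : pvLabelA (n : Int) ((n : Int) - 2) = "Second Most" := by
    unfold pvLabelA
    rw [if_neg (by omega), if_neg (by omega), if_neg (by omega), if_pos rfl]
  have e3 : pvLabelA (n : Int) ((n : Int) - 1) = "Most" := by
    unfold pvLabelA
    rw [if_neg (by omega), if_pos rfl]
  rw [e0, e1, e2, e3]
  by_cases hpar : n % 2 = 1
  · rw [hmod, if_pos (by exact_mod_cast hpar)]
    have hm5 : 5 ≤ n := by omega
    have hdb : 2 ≤ n / 2 ∧ n / 2 + 1 ≤ n - 2 ∧ n / 2 ≤ n - 3 := by omega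
    rw [hdiv]
    -- split the core range around the middle index
    rw [PySem.List.pyRange_one_append 2 ((n / 2 : Nat) : Int) ((n : Int) - 2)
          (by exact_mod_cast (by omega : (2 : Int) ≤ ((n / 2 : Nat) : Int))) (by push_cast; omega),
        PySem.List.pyRange_one_append ((n / 2 : Nat) : Int) (((n / 2 : Nat) : Int) + 1) ((n : Int) - 2)
          (by omega) (by push_cast; omega),
        PySem.List.pyRange_one_singleton]
    simp only [List.map_append, List.map_cons, List.map_nil]
    have emid : pvLabelA (n : Int) ((n / 2 : Nat) : Int) = "Middle" := by
      unfold pvLabelA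
      rw [if_neg (by push_cast; omega), if_neg (by push_cast; omega),
          if_neg (by push_cast; omega), if_neg (by push_cast; omega),
          if_pos ⟨by rw [hmod]; exact_mod_cast hpar, by rw [hdiv]⟩]
    rw [emid,
        pvSeg (n : Int) 2 ((n / 2 : Nat) : Int) (fun i hlo hhi => pvLabelA_pos _ _
          (by omega) (by omega) (by push_cast at hhi ⊢; omega) (by push_cast at hhi ⊢; omega)
          (by rw [hdiv]; rintro ⟨-, rfl⟩; omega)),
        pvSeg (n : Int) (((n / 2 : Nat) : Int) + 1) ((n : Int) - 2) (fun i hlo hhi => pvLabelA_pos _ _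
          (by push_cast at hlo ⊢; omega) (by push_cast at hlo ⊢; omega) (by omega) (by omega)
          (by rw [hdiv]; rintro ⟨-, rfl⟩; omega))]
    simp
  · rw [hmod, if_neg (by exact_mod_cast hpar)]
    rw [pvSeg (n : Int) 2 ((n : Int) - 2) (fun i hlo hhi => pvLabelA_pos _ _
          (by omega) (by omega) (by omega) (by omega)
          (by rw [hmod]; rintro ⟨hc, -⟩; exact absurd (by exact_mod_cast hc) hpar))]
    simp
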